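-- pv_equiv track=rewrite | github.com/WolfangAukang/IC-TEC-Bachelor-Works | Introducción y taller de programación/Ericka/Ericka Segundo Semestre/src/Sopeletras.py | crearSopaLetras
-- ===== SOURCE A (Python) =====
-- def crearSopaLetras(hilera):
--     m= [[]]
--     cf=0
--     i=0    # i lleva el simbolo actual dentro de la hilera
--     while i < len(hilera):
--         if hilera [i] != "\n":
--             m[cf].append(hilera[i])
--         else:
--             m.append([])
--             cf+=1
--         i+=1
--     return m
-- ===== SOURCE B (Python) =====
-- def crearSopaLetras(hilera):
--     # Idiomatic: split on newlines, then list each line's characters.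
--     return [list(line) for line in hilera.split("\n")]
-- ===== Notes on version B (the rewrite author's own statement) =====
-- stated objective: idiomatic
-- what changed: Replaces the manual index-tracking character scan that appends into an indexed row with a split on newlines followed by a per-line list() call; the C-level str.split/list() give a constant-factor speedup over per-character interpreted appends.
import Mathlib
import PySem

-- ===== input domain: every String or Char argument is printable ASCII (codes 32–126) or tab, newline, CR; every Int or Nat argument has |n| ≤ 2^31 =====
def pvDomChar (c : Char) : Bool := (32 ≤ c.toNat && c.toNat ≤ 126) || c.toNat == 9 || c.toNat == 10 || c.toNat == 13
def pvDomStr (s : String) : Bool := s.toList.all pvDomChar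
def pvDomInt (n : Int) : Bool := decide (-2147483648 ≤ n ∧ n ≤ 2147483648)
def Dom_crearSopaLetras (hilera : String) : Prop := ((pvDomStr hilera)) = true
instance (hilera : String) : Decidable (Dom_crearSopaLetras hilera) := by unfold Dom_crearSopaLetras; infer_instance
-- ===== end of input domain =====

-- B replaces A's index-tracking character scan with split-on-newline plus per-line char listing (idiomatic; same cost).

-- ===== PORT A =====
-- A walks the characters once, appending each non-'\n' char (as a 1-char string)
-- to row cf of m, and starting a fresh row on '\n'; state = (m, cf).
def crearSopaLetras (hilera : String) : List (List String) :=
  (hilera.toList.foldl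
    (fun (st : List (List String) × Nat) c =>
      if c ≠ '\n' then (st.1.modify st.2 (· ++ [String.ofList [c]]), st.2)
      else (st.1 ++ [[]], st.2 + 1))
    ([[]], 0)).1

-- ===== PORT B =====
-- Source B: [list(line) for line in hilera.split("\n")]
def crearSopaLetras_alt (hilera : String) : List (List String) :=
  (PySem.Chars.splitOn hilera.toList ['\n']).map (fun line => line.map (fun c => String.ofList [c]))

-- ===== PRECONDITION & SPEC =====
def Spec_crearSopaLetras (hilera : String) (out : List (List String)) : Prop := out = crearSopaLetras_alt hilera
instance (hilera : String) (out : List (List String)) : Decidable (Spec_crearSopaLetras hilera out) := by unfold Spec_crearSopaLetras; infer_instance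

-- ===== CLAIM (what is proved, stated in full; the proofs are below) =====
def Claim_equal_crearSopaLetras : Prop := ∀ (hilera : String), Dom_crearSopaLetras hilera → Spec_crearSopaLetras hilera (crearSopaLetras hilera)

-- ===== LEMMAS AND PROOFS =====

-- simple reference splitter on newlines (cur is kept reversed, as splitOn.go does)
def pvSegs (cur : List Char) : List Char → List (List Char)
  | [] => [cur.reverse]
  | c :: rest => if c = '\n' then cur.reverse :: pvSegs [] rest else pvSegs (c :: cur) rest

theorem pvGo_eq_segs (cs : List Char) : ∀ (fuel : Nat) (cur : List Char) (acc : List (List Char)),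
    cs.length ≤ fuel →
    PySem.Chars.splitOn.go ['\n'] fuel cs cur acc = acc.reverse ++ pvSegs cur cs := by
  induction cs with
  | nil =>
    intro fuel cur acc _
    cases fuel <;> simp [PySem.Chars.splitOn.go, pvSegs]
  | cons c rest ih =>
    intro fuel cur acc hf
    cases fuel with
    | zero => simp at hf
    | succ fuel =>
      by_cases hc : c = '\n'
      · subst hc
        rw [show PySem.Chars.splitOn.go ['\n'] (fuel+1) ('\n' :: rest) cur acc
            = PySem.Chars.splitOn.go ['\n'] fuel rest [] (cur.reverse :: acc) by
          simp [PySem.Chars.splitOn.go, List.isPrefixOf]]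
        rw [ih fuel [] (cur.reverse :: acc) (by simpa using hf)]
        simp [pvSegs]
      · rw [show PySem.Chars.splitOn.go ['\n'] (fuel+1) (c :: rest) cur acc
            = PySem.Chars.splitOn.go ['\n'] fuel rest (c :: cur) acc by
          simp [PySem.Chars.splitOn.go, List.isPrefixOf]
          exact fun h => absurd h.symm hc]
        rw [ih fuel (c :: cur) acc (by simpa using hf)]
        simp [pvSegs, hc]

theorem pvSplitOn_eq_segs (cs : List Char) :
    PySem.Chars.splitOn cs ['\n'] = pvSegs [] cs := by
  unfold PySem.Chars.splitOn
  rw [pvGo_eq_segs cs (cs.length + 1) [] [] (by omega)]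
  simp

theorem pvModify_last {α : Type} (pre : List α) (x : α) (f : α → α) :
    (pre ++ [x]).modify pre.length f = pre ++ [f x] := by
  rw [List.modify_eq_take_cons_drop (by simp)]
  simp

theorem pvFoldA (cs : List Char) : ∀ (done : List (List String)) (cur : List Char),
    (cs.foldl
      (fun (st : List (List String) × Nat) c =>
        if c ≠ '\n' then (st.1.modify st.2 (· ++ [String.ofList [c]]), st.2)
        else (st.1 ++ [[]], st.2 + 1))
      (done ++ [cur.reverse.map (fun c => String.ofList [c])], done.length)).1
    = done ++ (pvSegs cur cs).map (fun line => line.map (fun c => String.ofList [c])) := by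
  induction cs with
  | nil => intro done cur; simp [pvSegs]
  | cons c rest ih =>
    intro done cur
    by_cases hc : c = '\n'
    · subst hc
      rw [List.foldl_cons, if_neg (by simp)]
      have h := ih (done ++ [cur.reverse.map (fun c => String.ofList [c])]) []
      simp only [List.reverse_nil, List.map_nil, List.length_append] at h
      simpa [pvSegs, List.append_assoc] using h
    · simp only [List.foldl_cons, if_pos hc, pvModify_last]
      have : (cur.reverse.map (fun c => String.ofList [c])) ++ [String.ofList [c]]
          = ((c :: cur).reverse.map (fun c => String.ofList [c])) := by simp
      rw [this, ih done (c :: cur)]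
      simp [pvSegs, hc]

-- ===== VERDICT (by name: the statement is the Claim_ definition above) =====
theorem crearSopaLetras_spec : Claim_equal_crearSopaLetras := by
  intro hilera _
  unfold Spec_crearSopaLetras crearSopaLetras crearSopaLetras_alt
  rw [pvSplitOn_eq_segs]
  have h := pvFoldA hilera.toList [] []
  simpa using h
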